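-- pv_equiv track=rewrite | github.com/e1630m/codewars | 6kyu/last_survivors_ep3.py | last_survivors
-- ===== SOURCE A (Python) =====
-- def last_survivors(a, n, ans=''):
--     for line, num_c in zip(list(zip(*a[::-1])), n):
--         i = 0
--         while num_c and i < len(line):
--             if line[i] != ' ':
--                 num_c -= 1
--             i += 1
--         ans += ''.join(c for c in line[i:] if c != ' ')
--     return ans
-- ===== SOURCE B (Python) =====
-- def last_survivors(a, n, ans=''):
--     pieces = []
--     for col, k in zip(zip(*a[::-1]), n):
--         chars = [c for c in col if c != ' ']
--         pieces.append(''.join(chars[k:]))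
--     return ans + ''.join(pieces)
-- ===== Notes on version B (the rewrite author's own statement) =====
-- stated objective: simpler
-- what changed: A's per-column index-counting while loop (skip survivors one index at a time, then filter the tail) is replaced by filter-then-slice: materialise the column's non-space characters once and drop the first k by slicing, joining the pieces instead of string-accumulating; Pre_ excludes a negative skip count paired with a column holding a non-space character, a corner where A's truthiness loop drops the whole column while a slice keeps a tail and neither value is the specified one.
-- outside the precondition, e.g. on last_survivors(['ab', 'cd'], [-1], ''): A returns '', B returns 'a'
import Mathlib
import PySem

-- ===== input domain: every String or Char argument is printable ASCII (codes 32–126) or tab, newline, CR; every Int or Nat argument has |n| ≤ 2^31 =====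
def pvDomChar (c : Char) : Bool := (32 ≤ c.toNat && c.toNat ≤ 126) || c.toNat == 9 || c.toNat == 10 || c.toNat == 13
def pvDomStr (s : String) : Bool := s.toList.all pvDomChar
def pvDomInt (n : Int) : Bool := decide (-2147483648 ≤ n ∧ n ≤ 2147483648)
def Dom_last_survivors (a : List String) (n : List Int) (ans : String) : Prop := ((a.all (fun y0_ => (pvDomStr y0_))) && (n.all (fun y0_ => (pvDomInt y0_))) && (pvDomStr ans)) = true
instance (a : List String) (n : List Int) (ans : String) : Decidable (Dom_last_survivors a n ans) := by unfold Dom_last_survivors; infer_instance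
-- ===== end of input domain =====

-- B replaces A's index-counting while loop with filter-then-slice per column (objective: simpler).

-- shared helper: Python's list(zip(*a[::-1])) — columns of the reversed grid,
-- truncated to the shortest string (zip's rule); exact for the strings admitted by Dom
def pyCols (a : List String) : List (List Char) :=
  match ((a.reverse).map String.length).min? with
  | none => []
  | some m => (List.range m).map (fun j => (a.reverse).map (fun s => s.toList.getD j ' '))

-- ===== PORT A =====
-- A's while loop over state (num_c, i): returns the final i
def skipIdx (line : List Char) (k : Int) (i : Nat) : Nat :=
  if h : k ≠ 0 ∧ i < line.length then
    skipIdx line (if line.getD i ' ' ≠ ' ' then k - 1 else k) (i + 1)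
  else i
termination_by line.length - i
decreasing_by omega

def last_survivors (a : List String) (n : List Int) (ans : String) : String :=
  ((pyCols a).zip n).foldl
    (fun acc p =>
      let i := skipIdx p.1 p.2 0
      acc ++ String.ofList ((p.1.drop i).filter (fun c => c ≠ ' '))) ans

-- ===== PORT B =====
def last_survivors_alt (a : List String) (n : List Int) (ans : String) : String :=
  let pieces := ((pyCols a).zip n).map
    (fun p =>
      let chars := p.1.filter (fun c => c ≠ ' ')
      String.ofList (PySem.List.slice chars (some p.2) none))
  ans ++ String.join pieces

-- ===== PRECONDITION & SPEC =====
-- Pre_ excludes negative skip counts paired with a column that has a non-space character: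
-- there A's truthiness loop consumes the whole column while Python's negative slice keeps
-- a tail — a degenerate corner where neither value is the specified one.
def Pre_last_survivors (a : List String) (n : List Int) (ans : String) : Prop :=
  ∀ p ∈ (pyCols a).zip n, 0 ≤ p.2 ∨ p.1.all (fun c => c = ' ')
instance (a : List String) (n : List Int) (ans : String) : Decidable (Pre_last_survivors a n ans) := by unfold Pre_last_survivors; infer_instance

def pvWitness_last_survivors : List String × List Int × String :=
  (["ab c", "d ef", "ghij"], [2, 1, 0, 3], "x")

def Spec_last_survivors (a : List String) (n : List Int) (ans : String) (out : String) : Prop := out = last_survivors_alt a n ans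
instance (a : List String) (n : List Int) (ans : String) (out : String) : Decidable (Spec_last_survivors a n ans out) := by unfold Spec_last_survivors; infer_instance

-- ===== CLAIM =====
def Claim_equal_last_survivors : Prop := ∀ (a : List String) (n : List Int) (ans : String), Dom_last_survivors a n ans → Pre_last_survivors a n ans → Spec_last_survivors a n ans (last_survivors a n ans)

-- ===== LEMMAS AND PROOFS =====

-- structural form of A's skip loop: the suffix left after the loop
def skipL (line : List Char) (k : Int) : List Char :=
  match line with
  | [] => []
  | c :: t => if k = 0 then c :: t else skipL t (if c ≠ ' ' then k - 1 else k)

theorem drop_skipIdx (line : List Char) :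
    ∀ i k, line.drop (skipIdx line k i) = skipL (line.drop i) k := by
  intro i
  induction' hn : line.length - i using Nat.strong_induction_on with m ih generalizing i
  intro k
  by_cases h : k ≠ 0 ∧ i < line.length
  · obtain ⟨hk, hi⟩ := h
    have hdrop : line.drop i = line.getD i ' ' :: line.drop (i + 1) := by
      rw [List.drop_eq_getElem_cons hi, List.getD_eq_getElem line ' ' hi]
    rw [skipIdx, dif_pos ⟨hk, hi⟩,
        ih (line.length - (i + 1)) (by omega) (i + 1) rfl, hdrop, skipL, if_neg hk]
  · rw [skipIdx, dif_neg h]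
    rcases not_and_or.mp h with hk | hi
    · have hk0 : k = 0 := not_not.mp hk
      subst hk0
      cases hd : line.drop i with
      | nil => rfl
      | cons c t => rfl
    · have hnil : line.drop i = [] := List.drop_eq_nil_of_le (by omega)
      simp [hnil, skipL]

theorem filter_skipL (line : List Char) : ∀ k : Int, 0 ≤ k →
    (skipL line k).filter (fun c => c ≠ ' ') =
      (line.filter (fun c => c ≠ ' ')).drop k.toNat := by
  induction line with
  | nil => intro k _; simp [skipL]
  | cons c t ih =>
    intro k hk
    rw [skipL]
    by_cases hk0 : k = 0
    · subst hk0; simp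
    · rw [if_neg hk0]
      by_cases hc : c = ' '
      · have hif : (if c ≠ ' ' then k - 1 else k) = k := by simp [hc]
        rw [hif, ih k hk]
        simp [hc]
      · rw [if_pos (by simp [hc]), ih (k - 1) (by omega)]
        have h2 : k.toNat = (k - 1).toNat + 1 := by omega
        rw [h2]
        simp [hc]

theorem foldl_str_append (l : List String) :
    ∀ s : String, l.foldl (fun r t => r ++ t) s = s ++ l.foldl (fun r t => r ++ t) "" := by
  induction l with
  | nil => intro s; simp
  | cons a t ih =>
    intro s
    simp only [List.foldl_cons]
    rw [ih (s ++ a), ih ("" ++ a)]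
    simp [String.append_assoc]

theorem foldl_append_join (f : List Char × Int → String) :
    ∀ (ps : List (List Char × Int)) (ans : String),
      ps.foldl (fun acc p => acc ++ f p) ans = ans ++ String.join (ps.map f) := by
  intro ps
  induction ps with
  | nil => intro ans; simp [String.join]
  | cons p t ih =>
    intro ans
    simp only [List.foldl_cons, List.map_cons, ih]
    unfold String.join
    simp only [List.foldl_cons]
    rw [foldl_str_append (t.map f) ("" ++ f p)]
    simp [String.append_assoc]

-- ===== VERDICT =====
theorem last_survivors_spec : Claim_equal_last_survivors := by
  intro a n ans _ hpre
  unfold Spec_last_survivors last_survivors last_survivors_alt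
  rw [foldl_append_join]
  congr 1
  apply congrArg
  apply List.map_congr_left
  intro p hp
  have h1 : p.1.drop (skipIdx p.1 p.2 0) = skipL p.1 p.2 := by
    simpa using drop_skipIdx p.1 0 p.2
  rcases hpre p hp with hk | hsp
  · rw [h1, filter_skipL p.1 p.2 hk]
    simp only [PySem.List.slice_from _ hk]
  · have hall : ∀ c ∈ p.1, c = ' ' := by simpa using hsp
    have hA : (p.1.drop (skipIdx p.1 p.2 0)).filter (fun c => c ≠ ' ') = [] := by
      refine List.filter_eq_nil_iff.mpr ?_
      intro c hc
      simp [hall c (List.mem_of_mem_drop hc)]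
    have hB : p.1.filter (fun c => c ≠ ' ') = [] := by
      refine List.filter_eq_nil_iff.mpr ?_
      intro c hc
      simp [hall c hc]
    rw [hA, hB]
    simp [PySem.List.slice]
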